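-- pv_equiv track=rewrite | github.com/dolly843433/AST | new_app/utils.py | separate_conditions
-- ===== SOURCE A (Python) =====
-- def separate_conditions(condition):
--     # Define the logical operators
--     logical_operators = ['AND', 'OR']
--
--     # Split the condition into parts based on the operators
--     parts = []
--     current_part = ''
--     in_parentheses = 0
--
--     for char in condition:
--         if char == '(':
--             in_parentheses += 1
--         elif char == ')':
--             in_parentheses -= 1
--
--         current_part += char
--
--         # Check if we reached the end of a part (considering parentheses)
--         if in_parentheses == 0 and any(op in current_part for op in logical_operators):
--             if any(current_part.strip().endswith(op) for op in logical_operators):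
--                 parts.extend(current_part.strip().rsplit(' ',1))
--             else:
--                 parts.append(current_part.strip())
--             current_part = ''
--
--     # Add the last part if there's any remaining
--     if current_part:
--         parts.append(current_part.strip())
--
--     if len(parts) == 1 and parts[0] == condition and any(ops in condition for ops in logical_operators):
--         return separate_conditions(condition[1:-1])
--     return parts
-- ===== SOURCE B (Python) =====
-- def separate_conditions(condition):
--     # Single pass per scan: the "current part contains AND/OR" test is maintained
--     # incrementally as a flag (checking only the last 2-3 chars) instead of
--     # rescanning the growing current part with `op in current_part` at every char,
--     # and the tail recursion on condition[1:-1] becomes a loop.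
--     while True:
--         parts = []
--         buf = []
--         depth = 0
--         has_op = False
--         seen_op = False
--         for ch in condition:
--             if ch == '(':
--                 depth += 1
--             elif ch == ')':
--                 depth -= 1
--             buf.append(ch)
--             if not has_op and (buf[-3:] == ['A', 'N', 'D'] or buf[-2:] == ['O', 'R']):
--                 has_op = True
--                 seen_op = True
--             if depth == 0 and has_op:
--                 seg = ''.join(buf).strip()
--                 if seg.endswith('AND') or seg.endswith('OR'):
--                     i = seg.rfind(' ')
--                     if i == -1:
--                         parts.append(seg)
--                     else:
--                         parts.append(seg[:i])
--                         parts.append(seg[i + 1:])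
--                 else:
--                     parts.append(seg)
--                 buf = []
--                 has_op = False
--         if buf:
--             parts.append(''.join(buf).strip())
--         if len(parts) == 1 and parts[0] == condition and seen_op:
--             condition = condition[1:-1]
--         else:
--             return parts
-- ===== Notes on version B (the rewrite author's own statement) =====
-- stated objective: faster
-- what changed: B maintains the contains-an-operator test for the current part as an incrementally updated flag that inspects only the last 2-3 characters appended, instead of rescanning the whole growing current part at every character, and turns the tail recursion on condition[1:-1] into a loop.
import Mathlib
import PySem

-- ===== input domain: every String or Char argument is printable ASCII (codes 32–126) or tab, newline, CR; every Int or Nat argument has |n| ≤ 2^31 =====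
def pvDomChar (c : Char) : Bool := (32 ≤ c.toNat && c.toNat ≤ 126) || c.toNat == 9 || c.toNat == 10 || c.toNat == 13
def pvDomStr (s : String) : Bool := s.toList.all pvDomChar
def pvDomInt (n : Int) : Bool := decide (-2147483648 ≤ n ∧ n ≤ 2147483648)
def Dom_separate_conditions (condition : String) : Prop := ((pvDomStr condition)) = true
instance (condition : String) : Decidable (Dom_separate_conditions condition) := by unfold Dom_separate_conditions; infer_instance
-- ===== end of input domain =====

-- B replaces A's per-character rescan of the growing current part by an incrementally
-- maintained flag that inspects only the last 2-3 characters (objective: faster).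

-- ===== PORT A =====

-- hand port of s.rsplit(' ', 1) (single-char separator, maxsplit 1); exact: rfind gives the
-- index of the last ' ' (-1 if absent) and the two slices are the pieces Python returns
def pvRsplit1 (s : List Char) : List (List Char) :=
  let i := PySem.Chars.rfind s [' ']
  if i == -1 then [s]
  else [PySem.List.slice s none (some i), PySem.List.slice s (some (i + 1)) none]

-- one iteration of A's for-loop; state = (parts, current_part, in_parentheses)
def pvStepA (st : List (List Char) × List Char × Int) (c : Char) :
    List (List Char) × List Char × Int :=
  let dep := if c == '(' then st.2.2 + 1 else if c == ')' then st.2.2 - 1 else st.2.2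
  let cur := st.2.1 ++ [c]
  if dep == 0 && (PySem.Chars.isIn ['A','N','D'] cur || PySem.Chars.isIn ['O','R'] cur) then
    let s := PySem.Chars.strip cur
    if PySem.Chars.endswith s ['A','N','D'] || PySem.Chars.endswith s ['O','R'] then
      (st.1 ++ pvRsplit1 s, [], dep)
    else
      (st.1 ++ [s], [], dep)
  else (st.1, cur, dep)

def pvSepACore (cs : List Char) : List (List Char) :=
  let st := cs.foldl pvStepA ([], [], 0)
  let parts := if st.2.1 ≠ [] then st.1 ++ [PySem.Chars.strip st.2.1] else st.1
  if h : parts.length == 1 && decide (parts.headD [] = cs) &&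
      (PySem.Chars.isIn ['A','N','D'] cs || PySem.Chars.isIn ['O','R'] cs) then
    pvSepACore (PySem.List.slice cs (some 1) (some (-1)))
  else parts
termination_by cs.length
decreasing_by
  have hne : cs ≠ [] := by rintro rfl; revert h; decide
  have h1 : 1 ≤ cs.length := by
    cases cs with
    | nil => exact absurd rfl hne
    | cons a t => simp
  rw [PySem.List.length_slice]
  simp only [PySem.List.clampIdx_neg_one]
  omega

def separate_conditions (condition : String) : List String :=
  (pvSepACore condition.toList).map (fun cs => String.ofList cs)

-- ===== PORT B =====

-- one iteration of B's for-loop; state = (parts, buf, depth, has_op, seen_op)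
def pvStepB (st : List (List Char) × List Char × Int × Bool × Bool) (c : Char) :
    List (List Char) × List Char × Int × Bool × Bool :=
  let dep := if c == '(' then st.2.2.1 + 1 else if c == ')' then st.2.2.1 - 1 else st.2.2.1
  let buf := st.2.1 ++ [c]
  let fire := !st.2.2.2.1 &&
      (PySem.List.slice buf (some (-3)) none == ['A','N','D'] ||
       PySem.List.slice buf (some (-2)) none == ['O','R'])
  let hasOp := st.2.2.2.1 || fire
  let seen := st.2.2.2.2 || fire
  if dep == 0 && hasOp then
    let seg := PySem.Chars.strip buf
    let parts :=
      if PySem.Chars.endswith seg ['A','N','D'] || PySem.Chars.endswith seg ['O','R'] then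
        let i := PySem.Chars.rfind seg [' ']
        if i == -1 then st.1 ++ [seg]
        else st.1 ++ [PySem.List.slice seg none (some i)] ++
             [PySem.List.slice seg (some (i + 1)) none]
      else st.1 ++ [seg]
    (parts, [], dep, false, seen)
  else (st.1, buf, dep, hasOp, seen)

def pvSepBCore (cs : List Char) : List (List Char) :=
  let st := cs.foldl pvStepB ([], [], 0, false, false)
  let parts := if st.2.1 ≠ [] then st.1 ++ [PySem.Chars.strip st.2.1] else st.1
  if h : parts.length == 1 && decide (parts.headD [] = cs) && st.2.2.2.2 then
    pvSepBCore (PySem.List.slice cs (some 1) (some (-1)))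
  else parts
termination_by cs.length
decreasing_by
  have hne : cs ≠ [] := by rintro rfl; revert h; decide
  have h1 : 1 ≤ cs.length := by
    cases cs with
    | nil => exact absurd rfl hne
    | cons a t => simp
  rw [PySem.List.length_slice]
  simp only [PySem.List.clampIdx_neg_one]
  omega

def separate_conditions_alt (condition : String) : List String :=
  (pvSepBCore condition.toList).map (fun cs => String.ofList cs)

-- ===== PRECONDITION & SPEC =====
def Spec_separate_conditions (condition : String) (out : List String) : Prop := out = separate_conditions_alt condition
instance (condition : String) (out : List String) : Decidable (Spec_separate_conditions condition out) := by unfold Spec_separate_conditions; infer_instance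

-- ===== CLAIM (what is proved, stated in full; the proofs are below) =====
def Claim_equal_separate_conditions : Prop := ∀ (condition : String), Dom_separate_conditions condition → Spec_separate_conditions condition (separate_conditions condition)

-- ===== LEMMAS AND PROOFS =====

theorem infix_append_singleton (t xs : List Char) (c : Char) :
    t <:+: (xs ++ [c]) ↔ t <:+: xs ∨ t <:+ (xs ++ [c]) := by
  constructor
  · rintro ⟨u, v, huv⟩
    rcases v.eq_nil_or_concat with rfl | ⟨v', d, rfl⟩
    · right; exact ⟨u, by simpa using huv⟩
    · left
      have h2 : (u ++ (t ++ v')) ++ [d] = xs ++ [c] := by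
        simpa [List.append_assoc] using huv
      have h3 := congrArg List.dropLast h2
      simp only [List.dropLast_concat] at h3
      exact ⟨u, v', by simpa [List.append_assoc] using h3⟩
  · rintro (h | h)
    · exact h.trans (List.prefix_append xs [c]).isInfix
    · exact h.isInfix

theorem pv_isIn_append_singleton (t xs : List Char) (c : Char) :
    PySem.Chars.isIn t (xs ++ [c]) =
      (PySem.Chars.isIn t xs || PySem.Chars.endswith (xs ++ [c]) t) := by
  rw [Bool.eq_iff_iff]
  simp only [PySem.Chars.isIn_iff_infix, Bool.or_eq_true, PySem.Chars.endswith_iff]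
  exact infix_append_singleton t xs c

theorem pv_isIn_of_infix (t xs ys : List Char) (h : xs <:+: ys)
    (hx : PySem.Chars.isIn t xs = true) : PySem.Chars.isIn t ys = true := by
  rw [PySem.Chars.isIn_iff_infix] at hx ⊢
  exact hx.trans h

theorem pv_lastN_eq_endswith (t xs : List Char) (k : Int) (hk : k = (t.length : Int))
    (ht : t ≠ []) :
    (PySem.List.slice xs (some (-k)) none == t) = PySem.Chars.endswith xs t := by
  subst hk
  rw [PySem.List.slice_from_neg_natCast xs t.length (by cases t <;> simp_all)]
  rw [Bool.eq_iff_iff]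
  simp only [beq_iff_eq, PySem.Chars.endswith_iff]
  constructor
  · rintro h; rw [← h]; exact List.drop_suffix _ _
  · rintro ⟨u, rfl⟩
    simp [List.length_append]

theorem pvRsplit1_ne_nil (s : List Char) : pvRsplit1 s ≠ [] := by
  simp only [pvRsplit1]
  split <;> simp

def pvInv (p : List Char) (a : List (List Char) × List Char × Int)
    (b : List (List Char) × List Char × Int × Bool × Bool) : Prop :=
  b.1 = a.1 ∧ b.2.1 = a.2.1 ∧ b.2.2.1 = a.2.2 ∧
  b.2.2.2.1 = (PySem.Chars.isIn ['A','N','D'] a.2.1 || PySem.Chars.isIn ['O','R'] a.2.1) ∧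
  b.2.2.2.2 = (!a.1.isEmpty || b.2.2.2.1) ∧
  (a.1 = [] → a.2.1 = p) ∧
  (a.1 ≠ [] → (PySem.Chars.isIn ['A','N','D'] p || PySem.Chars.isIn ['O','R'] p) = true) ∧
  a.2.1 <:+ p

theorem pvInv_step (p : List Char) (a b) (c : Char) (h : pvInv p a b) :
    pvInv (p ++ [c]) (pvStepA a c) (pvStepB b c) := by
  obtain ⟨P, cur, dep⟩ := a
  obtain ⟨P', buf, dep', hasOp, seen⟩ := b
  obtain ⟨h1, h2, h3, h4, h5, h6, h7, h8⟩ := h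
  simp only at h1 h2 h3 h4 h5 h6 h7 h8
  subst h1 h2 h3 h4 h5
  simp only [pvStepA, pvStepB]
  rw [pv_lastN_eq_endswith ['A','N','D'] (buf ++ [c]) 3 (by norm_num) (by simp),
      pv_lastN_eq_endswith ['O','R'] (buf ++ [c]) 2 (by norm_num) (by simp)]
  have hsuf : (buf ++ [c]) <:+ (p ++ [c]) := by
    obtain ⟨u, rfl⟩ := h8
    exact ⟨u, by simp⟩
  have hOp :
      ((PySem.Chars.isIn ['A','N','D'] buf || PySem.Chars.isIn ['O','R'] buf) ||
        (!(PySem.Chars.isIn ['A','N','D'] buf || PySem.Chars.isIn ['O','R'] buf) &&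
          (PySem.Chars.endswith (buf ++ [c]) ['A','N','D'] ||
           PySem.Chars.endswith (buf ++ [c]) ['O','R'])))
      = (PySem.Chars.isIn ['A','N','D'] (buf ++ [c]) ||
         PySem.Chars.isIn ['O','R'] (buf ++ [c])) := by
    rw [pv_isIn_append_singleton ['A','N','D'] buf c, pv_isIn_append_singleton ['O','R'] buf c]
    cases PySem.Chars.isIn ['A','N','D'] buf <;>
      cases PySem.Chars.isIn ['O','R'] buf <;>
      cases PySem.Chars.endswith (buf ++ [c]) ['A','N','D'] <;>
      cases PySem.Chars.endswith (buf ++ [c]) ['O','R'] <;> rfl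

  rw [hOp]
  by_cases hfl :
      ((if c == '(' then dep' + 1 else if c == ')' then dep' - 1 else dep') == 0 &&
       (PySem.Chars.isIn ['A','N','D'] (buf ++ [c]) ||
        PySem.Chars.isIn ['O','R'] (buf ++ [c]))) = true
  · rw [if_pos hfl, if_pos hfl]
    have hinB : (PySem.Chars.isIn ['A','N','D'] (buf ++ [c]) ||
        PySem.Chars.isIn ['O','R'] (buf ++ [c])) = true := Bool.and_elim_right hfl
    have hin : (PySem.Chars.isIn ['A','N','D'] (p ++ [c]) ||
        PySem.Chars.isIn ['O','R'] (p ++ [c])) = true := by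
      rcases (Bool.or_eq_true ..).mp hinB with h' | h'
      · exact (Bool.or_eq_true ..).mpr (Or.inl (pv_isIn_of_infix _ _ _ hsuf.isInfix h'))
      · exact (Bool.or_eq_true ..).mpr (Or.inr (pv_isIn_of_infix _ _ _ hsuf.isInfix h'))
    have h9 : ((PySem.Chars.isIn ['A','N','D'] buf || PySem.Chars.isIn ['O','R'] buf) ||
        (!(PySem.Chars.isIn ['A','N','D'] buf || PySem.Chars.isIn ['O','R'] buf) &&
          (PySem.Chars.endswith (buf ++ [c]) ['A','N','D'] ||
           PySem.Chars.endswith (buf ++ [c]) ['O','R']))) = true := by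
      rw [hOp]; exact hinB
    have hL : ((!P'.isEmpty ||
        (PySem.Chars.isIn ['A','N','D'] buf || PySem.Chars.isIn ['O','R'] buf)) ||
        (!(PySem.Chars.isIn ['A','N','D'] buf || PySem.Chars.isIn ['O','R'] buf) &&
          (PySem.Chars.endswith (buf ++ [c]) ['A','N','D'] ||
           PySem.Chars.endswith (buf ++ [c]) ['O','R']))) = true := by
      rcases (Bool.or_eq_true ..).mp h9 with h' | h'
      · rw [h']; simp
      · rw [h']; simp
    by_cases hew : (PySem.Chars.endswith (PySem.Chars.strip (buf ++ [c])) ['A','N','D'] ||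
        PySem.Chars.endswith (PySem.Chars.strip (buf ++ [c])) ['O','R']) = true
    · rw [if_pos hew, if_pos hew]
      by_cases hrf : (PySem.Chars.rfind (PySem.Chars.strip (buf ++ [c])) [' '] == -1) = true
      · rw [if_pos hrf]
        refine ⟨?_, rfl, rfl, by rfl, ?_, by intro hA; exact absurd (List.append_eq_nil_iff.mp hA).2 (pvRsplit1_ne_nil _), fun _ => hin, List.nil_suffix⟩
        · simp only [pvRsplit1]
          rw [if_pos hrf]
        · simp only []
          rw [hL]
          simp [pvRsplit1_ne_nil]
      · rw [if_neg hrf]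
        refine ⟨?_, rfl, rfl, by rfl, ?_, by intro hA; exact absurd (List.append_eq_nil_iff.mp hA).2 (pvRsplit1_ne_nil _), fun _ => hin, List.nil_suffix⟩
        · simp only [pvRsplit1]
          rw [if_neg hrf]
          simp
        · simp only []
          rw [hL]
          simp [pvRsplit1_ne_nil]
    · rw [if_neg hew, if_neg hew]
      refine ⟨rfl, rfl, rfl, by rfl, ?_, by simp, fun _ => hin, List.nil_suffix⟩
      simp only []
      rw [hL]
      simp
  · rw [if_neg hfl, if_neg hfl]
    refine ⟨rfl, rfl, rfl, rfl, ?_, ?_, ?_, hsuf⟩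
    · simp only []
      rw [← hOp, Bool.or_assoc]
    · intro hP; rw [h6 hP]
    · intro hP
      rcases (Bool.or_eq_true ..).mp (h7 hP) with h' | h'
      · exact (Bool.or_eq_true ..).mpr
          (Or.inl (pv_isIn_of_infix _ _ _ (List.prefix_append p [c]).isInfix h'))
      · exact (Bool.or_eq_true ..).mpr
          (Or.inr (pv_isIn_of_infix _ _ _ (List.prefix_append p [c]).isInfix h'))

theorem pvInv_foldl (l : List Char) (p : List Char) (a b) (h : pvInv p a b) :
    pvInv (p ++ l) (l.foldl pvStepA a) (l.foldl pvStepB b) := by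
  induction l generalizing p a b with
  | nil => simpa using h
  | cons c l ih =>
    have := ih (p ++ [c]) _ _ (pvInv_step p a b c h)
    simpa using this

theorem pvSep_eq_aux : ∀ (n : Nat) (cs : List Char), cs.length ≤ n →
    pvSepBCore cs = pvSepACore cs := by
  intro n
  induction n with
  | zero =>
    intro cs h
    have : cs = [] := List.eq_nil_of_length_eq_zero (Nat.le_zero.mp h)
    subst this
    rw [pvSepBCore, pvSepACore]
    simp
  | succ n ih =>
    intro cs hlen
    have hInv : pvInv cs (cs.foldl pvStepA ([], [], 0))
        (cs.foldl pvStepB ([], [], 0, false, false)) := by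
      simpa using pvInv_foldl cs [] ([], [], 0) ([], [], 0, false, false)
        ⟨rfl, rfl, rfl, by rfl, by rfl, fun _ => rfl, fun hc => absurd rfl hc, List.nil_suffix⟩
    obtain ⟨h1, h2, h3, h4, h5, h6, h7, h8⟩ := hInv
    rw [pvSepBCore, pvSepACore]
    rw [h1, h2]
    set sa := cs.foldl pvStepA ([], [], 0) with hsa
    set parts := (if sa.2.1 ≠ [] then sa.1 ++ [PySem.Chars.strip sa.2.1] else sa.1) with hparts
    have hcond : (parts.length == 1 && decide (parts.headD [] = cs) &&
          (cs.foldl pvStepB ([], [], 0, false, false)).2.2.2.2)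
        = (parts.length == 1 && decide (parts.headD [] = cs) &&
          (PySem.Chars.isIn ['A','N','D'] cs || PySem.Chars.isIn ['O','R'] cs)) := by
      by_cases hx : (parts.length == 1 && decide (parts.headD [] = cs)) = true
      · have hlen1 : parts.length = 1 := by
          have := Bool.and_elim_left hx
          simpa using this
        have hhd : parts.headD [] = cs := by
          have := Bool.and_elim_right hx
          simpa using this
        rw [hx, Bool.true_and, Bool.true_and]
        by_cases hcur : sa.2.1 = []
        · have hp' : parts = sa.1 := by rw [hparts, if_neg (by simpa using hcur)]
          have hane : sa.1 ≠ [] := by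
            intro hnil
            rw [hp', hnil] at hlen1
            simp at hlen1
          rw [h5, h4, h7 hane]
          have : sa.1.isEmpty = false := by
            cases hh : sa.1 with
            | nil => exact absurd hh hane
            | cons x xs => rfl
          rw [this]
          rfl
        · have hp' : parts = sa.1 ++ [PySem.Chars.strip sa.2.1] := by
            rw [hparts, if_pos (by simpa using hcur)]
          have hanil : sa.1 = [] := by
            rw [hp'] at hlen1
            simp at hlen1
            cases hh : sa.1 with
            | nil => rfl
            | cons x xs => rw [hh] at hlen1; simp at hlen1
          have hcs : sa.2.1 = cs := h6 hanil
          rw [h5, h4, hanil, hcs]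
          rfl
      · have hx' : (parts.length == 1 && decide (parts.headD [] = cs)) = false :=
          Bool.not_eq_true _ ▸ (by simpa using hx)
        rw [hx', Bool.false_and, Bool.false_and]
    rw [dite_eq_ite, dite_eq_ite, hcond]
    by_cases hg : (parts.length == 1 && decide (parts.headD [] = cs) &&
        (PySem.Chars.isIn ['A','N','D'] cs || PySem.Chars.isIn ['O','R'] cs)) = true
    · rw [if_pos hg, if_pos hg]
      have hne : cs ≠ [] := by rintro rfl; revert hg; decide
      have h1' : 1 ≤ cs.length := by
        cases cs with
        | nil => exact absurd rfl hne
        | cons a t => simp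
      apply ih
      rw [PySem.List.length_slice]
      simp only [PySem.List.clampIdx_neg_one]
      omega
    · rw [if_neg hg, if_neg hg]

theorem pvSep_eq (cs : List Char) : pvSepBCore cs = pvSepACore cs :=
  pvSep_eq_aux cs.length cs (Nat.le_refl _)

-- ===== VERDICT (by name: the statement is the Claim_ definition above) =====
theorem separate_conditions_spec : Claim_equal_separate_conditions := by
  unfold Claim_equal_separate_conditions
  intro condition _
  unfold Spec_separate_conditions separate_conditions separate_conditions_alt
  rw [pvSep_eq]
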